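-- pv_equiv track=rewrite | github.com/rstraub/automate-the-boring-stuff-python | automateboringstuff/coin_flip_streak.py | streak_amount
-- ===== SOURCE A (Python) =====
-- def streak_amount(tosses):
--     amount_of_streaks = 0
--     current_streak = 0
--     for index, coin_toss in enumerate(tosses):
--         if index == 0:
--             current_streak = 1
--             continue
--
--         previous = tosses[index - 1]
--         if coin_toss == previous:
--             current_streak += 1
--         else:
--             current_streak = 1
--
--         if current_streak == 6:
--             amount_of_streaks += 1
--             current_streak = 0
--
--     return amount_of_streaks
-- ===== SOURCE B (Python) =====
-- def streak_amount(tosses):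
--     total = 0
--     rest = tosses
--     while rest:
--         head = rest[0]
--         k = 1
--         while k < len(rest) and rest[k] == head:
--             k += 1
--         total += k // 6
--         rest = rest[k:]
--     return total
-- ===== Notes on version B (the rewrite author's own statement) =====
-- stated objective: alternative
-- what changed: Replaces A's stateful element-by-element scan (current_streak with an index lookback and reset-on-6) by splitting the list into maximal runs of equal values and summing len(run) // 6 per run.
import Mathlib
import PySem

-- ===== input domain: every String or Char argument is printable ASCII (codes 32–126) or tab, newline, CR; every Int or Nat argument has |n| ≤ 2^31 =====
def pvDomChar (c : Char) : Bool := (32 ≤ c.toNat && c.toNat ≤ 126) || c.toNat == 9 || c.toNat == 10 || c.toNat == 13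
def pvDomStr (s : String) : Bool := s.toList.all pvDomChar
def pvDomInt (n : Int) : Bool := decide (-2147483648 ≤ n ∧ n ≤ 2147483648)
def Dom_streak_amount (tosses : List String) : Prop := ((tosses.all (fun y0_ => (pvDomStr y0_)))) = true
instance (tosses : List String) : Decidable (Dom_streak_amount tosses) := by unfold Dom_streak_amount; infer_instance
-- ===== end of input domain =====

-- B splits the list into maximal runs of equal values and sums length // 6 per run,
-- instead of A's stateful scan with a reset-on-6 streak counter (objective: alternative).

-- ===== PORT A =====
-- literal port of A's loop over enumerate(tosses); state = (amount_of_streaks, current_streak)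
def streakA_loop (tosses : List String) : List (Int × String) → Int × Int → Int × Int
  | [], st => st
  | (index, coin_toss) :: rest, (amount_of_streaks, current_streak) =>
    if index = 0 then streakA_loop tosses rest (amount_of_streaks, 1)
    else
      -- index ≥ 1 here, so tosses[index-1] exists in Python; .getD "" is never the default
      let previous := (PySem.List.pyGet? tosses (index - 1)).getD ""
      let current_streak' := if coin_toss == previous then current_streak + 1 else 1
      if current_streak' = 6 then streakA_loop tosses rest (amount_of_streaks + 1, 0)
      else streakA_loop tosses rest (amount_of_streaks, current_streak')

def streak_amount (tosses : List String) : Int :=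
  (streakA_loop tosses (PySem.List.enumerate tosses 0) (0, 0)).1

-- ===== PORT B =====
-- inner while: k = 1 + (number of leading elements of rest[1:] equal to head)
def runLenB (head : String) : List String → Nat
  | [] => 0
  | x :: xs => if x == head then runLenB head xs + 1 else 0

-- outer while over the remaining list `rest`; total += k // 6; rest = rest[k:]
def streak_amount_alt : List String → Int
  | [] => 0
  | head :: xs =>
    PySem.Int.floordiv ((1 + runLenB head xs : Nat) : Int) 6
      + streak_amount_alt (xs.drop (runLenB head xs))
termination_by rest => rest.length
decreasing_by
  simp only [List.length_drop, List.length_cons]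
  omega

-- ===== PRECONDITION & SPEC =====
def Spec_streak_amount (tosses : List String) (out : Int) : Prop := out = streak_amount_alt tosses
instance (tosses : List String) (out : Int) : Decidable (Spec_streak_amount tosses out) := by unfold Spec_streak_amount; infer_instance

-- ===== CLAIM (what is proved, stated in full; the proofs are below) =====
def Claim_equal_streak_amount : Prop := ∀ (tosses : List String), Dom_streak_amount tosses → Spec_streak_amount tosses (streak_amount tosses)

-- ===== LEMMAS AND PROOFS =====

-- A's per-element transition, as structural recursion carrying the previous element
def goA (prev : String) (cur : Int) : List String → Int
  | [] => 0
  | x :: xs =>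
    let c := if x == prev then cur + 1 else 1
    if c = 6 then 1 + goA x 0 xs else goA x c xs

lemma loopA_eq_goA : ∀ (xs pre : List String) (prev : String) (amount cur : Int),
    (streakA_loop (pre ++ prev :: xs)
      (PySem.List.enumerate xs ((pre.length : Int) + 1)) (amount, cur)).1
    = amount + goA prev cur xs := by
  intro xs
  induction xs with
  | nil => intro pre prev amount cur; simp [PySem.List.enumerate_nil, streakA_loop, goA]
  | cons x xs ih =>
    intro pre prev amount cur
    rw [PySem.List.enumerate_cons]
    have hidx : ((pre.length : Int) + 1) ≠ 0 := by positivity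
    have hprev : (PySem.List.pyGet? (pre ++ prev :: x :: xs)
        ((pre.length : Int) + 1 - 1)).getD "" = prev := by
      have : ((pre.length : Int) + 1 - 1) = ((pre.length : Nat) : Int) := by omega
      rw [this, PySem.List.pyGet?_natCast]
      simp
    have hsplit : pre ++ prev :: x :: xs = (pre ++ [prev]) ++ x :: xs := by simp
    have hlen : ((pre.length : Int) + 1) + 1 = (((pre ++ [prev]).length : Nat) : Int) + 1 := by
      simp
    simp only [streakA_loop, if_neg hidx, hprev, goA]
    rw [hsplit, hlen]
    split_ifs with h
    all_goals (rw [ih]; try ring)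

lemma goA_eq_runs : ∀ (xs : List String) (prev : String) (cur : Int),
    0 ≤ cur → cur < 6 →
    goA prev cur xs = (cur + (runLenB prev xs : Int)) / 6
      + streak_amount_alt (xs.drop (runLenB prev xs)) := by
  intro xs
  induction xs with
  | nil =>
    intro prev cur h0 h6
    simp [goA, runLenB, streak_amount_alt]
    omega
  | cons x xs ih =>
    intro prev cur h0 h6
    by_cases hx : x == prev
    · have hx' : x = prev := eq_of_beq hx
      subst hx'
      simp only [goA, runLenB, BEq.rfl, if_true, List.drop_succ_cons]
      split_ifs with hc
      · rw [ih x 0 le_rfl (by norm_num)]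
        generalize streak_amount_alt (xs.drop (runLenB x xs)) = S
        omega
      · rw [ih x (cur + 1) (by omega) (by omega)]
        generalize streak_amount_alt (xs.drop (runLenB x xs)) = S
        omega
    · simp only [goA, runLenB, hx, Bool.false_eq_true, if_false, List.drop_zero,
        Nat.cast_zero, add_zero]
      rw [if_neg (by norm_num : ¬ (1 : Int) = 6), ih x 1 (by norm_num) (by norm_num)]
      have hcur : cur / 6 = 0 := by omega
      rw [hcur, streak_amount_alt]
      rw [PySem.Int.floordiv_eq_ediv_of_pos (by norm_num)]
      push_cast
      ring

theorem streak_amount_spec : Claim_equal_streak_amount := by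
  unfold Claim_equal_streak_amount
  intro tosses _
  unfold Spec_streak_amount
  cases tosses with
  | nil => simp [streak_amount, PySem.List.enumerate_nil, streakA_loop, streak_amount_alt]
  | cons x xs =>
    unfold streak_amount
    rw [PySem.List.enumerate_cons]
    simp only [streakA_loop, reduceIte, zero_add]
    have h1 := loopA_eq_goA xs [] x 0 1
    simp only [List.nil_append, List.length_nil, Nat.cast_zero, zero_add] at h1
    rw [h1, goA_eq_runs xs x 1 (by norm_num) (by norm_num)]
    rw [streak_amount_alt]
    rw [PySem.Int.floordiv_eq_ediv_of_pos (by norm_num)]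
    push_cast
    ring
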